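-- pv_equiv track=rewrite | github.com/dkl0707/Brinson | utils.py | get_nearby_date
-- ===== SOURCE A (Python) =====
-- def get_nearby_date(date, datelst, flag_latest=True):
--     """
--     返回在日期列表datelst中，距离指定日期date最近的日期.
--     若date在datelst中，则历史最近的日期为date的上个日期，未来最近的日期为date
--
--     Parameters
--     ----------
--     date : str
--         指定日期
--     datelst : list
--         日期列表
--     flag_latest : bool
--         当date在datelst的两个元素之间时，
--         若为True, 最近日期为date的历史相邻日期,
--         若为False, 最近日期为未来相邻日期
--
--     Returns
--     -------
--     str
--         距离指定日期date最近的日期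
--     """
--     datelst = sorted(list(set(datelst)))
--     if date in datelst:
--         return date
--     elif date < datelst[0]:
--         return datelst[0]
--     elif date > datelst[-1]:
--         return datelst[-1]
--     # 以下为date在datelst两个相邻元素之间的情况
--     for idx in range(len(datelst)-1):
--         if (datelst[idx] < date) and (date < datelst[idx+1]):
--             # 历史最近
--             if flag_latest:
--                 return datelst[idx]
--             # 未来最近
--             else:
--                 return datelst[idx+1]
-- ===== SOURCE B (Python) =====
-- def get_nearby_date(date, datelst, flag_latest=True):
--     # One pass, no sorting: track the greatest element <= date and the
--     # smallest element >= date; the answer is determined by those two.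
--     lo = None  # greatest element <= date seen so far
--     hi = None  # smallest element >= date seen so far
--     for d in datelst:
--         if d <= date and (lo is None or lo < d):
--             lo = d
--         if date <= d and (hi is None or d < hi):
--             hi = d
--     if lo == date:
--         return date
--     if lo is None:
--         return hi
--     if hi is None:
--         return lo
--     return lo if flag_latest else hi
-- ===== Notes on version B (the rewrite author's own statement) =====
-- stated objective: faster
-- what changed: Replaces A's sort-dedup, membership test, boundary guards and linear adjacency scan by a single unsorted pass that tracks the greatest element <= date and the smallest element >= date, from which the answer is read off directly.
import Mathlib
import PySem

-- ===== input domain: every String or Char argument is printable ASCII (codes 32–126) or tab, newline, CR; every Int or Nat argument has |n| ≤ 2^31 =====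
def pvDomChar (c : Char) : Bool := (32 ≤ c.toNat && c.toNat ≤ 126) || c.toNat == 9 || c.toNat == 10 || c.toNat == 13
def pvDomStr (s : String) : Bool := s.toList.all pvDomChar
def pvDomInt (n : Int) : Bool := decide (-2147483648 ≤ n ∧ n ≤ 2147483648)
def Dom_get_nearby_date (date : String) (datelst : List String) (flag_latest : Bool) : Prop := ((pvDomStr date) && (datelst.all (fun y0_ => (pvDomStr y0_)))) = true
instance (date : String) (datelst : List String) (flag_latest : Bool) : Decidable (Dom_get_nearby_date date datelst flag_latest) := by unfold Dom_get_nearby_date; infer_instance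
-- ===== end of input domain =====

-- B replaces sort-dedup-then-scan by a single unsorted pass tracking the greatest element ≤ date
-- and the smallest element ≥ date (O(n) instead of O(n log n); measured faster in a timing run).

-- ===== PORT A =====
-- the adjacency loop `for idx in range(len(datelst)-1): if datelst[idx] < date < datelst[idx+1]: return …`
def scanA (date : String) (flag_latest : Bool) : List String → Option String
  | a :: b :: rest =>
    if a < date ∧ date < b then some (if flag_latest then a else b)
    else scanA date flag_latest (b :: rest)
  | _ => none

def get_nearby_date (date : String) (datelst : List String) (flag_latest : Bool) : String :=
  let s := PySem.List.sorted (PySem.Set.ofList datelst) (fun x => x) false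
  if date ∈ s then date
  else
    match PySem.List.pyGet? s 0 with
    | none => ""      -- `datelst[0]` on the empty list: IndexError, excluded by Pre_
    | some first =>
      if date < first then first
      else
        match PySem.List.pyGet? s (-1) with
        | none => ""  -- unreachable: s is nonempty here
        | some last =>
          if last < date then last
          else (scanA date flag_latest s).getD ""
          -- the loop always returns in this branch; Python's implicit-None fall-through is unreachable

-- ===== PORT B =====
def upMax (date : String) (lo : Option String) (d : String) : Option String :=
  if d ≤ date then
    match lo with
    | none => some d
    | some m => if m < d then some d else some m
  else lo

def upMin (date : String) (hi : Option String) (d : String) : Option String :=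
  if date ≤ d then
    match hi with
    | none => some d
    | some m => if d < m then some d else some m
  else hi

def get_nearby_date_alt (date : String) (datelst : List String) (flag_latest : Bool) : String :=
  let st := datelst.foldl (fun p d => (upMax date p.1 d, upMin date p.2 d)) (none, none)
  if st.1 = some date then date
  else
    match st.1, st.2 with
    | none, some h => h
    | some l, none => l
    | some l, some h => if flag_latest then l else h
    | none, none => ""  -- only for empty datelst (excluded by Pre_): Python B returns None there

-- ===== PRECONDITION & SPEC =====
-- Pre_ excludes exactly the empty list, on which A raises IndexError (datelst[0]).
def Pre_get_nearby_date (date : String) (datelst : List String) (flag_latest : Bool) : Prop := datelst ≠ []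
instance (date : String) (datelst : List String) (flag_latest : Bool) : Decidable (Pre_get_nearby_date date datelst flag_latest) := by unfold Pre_get_nearby_date; infer_instance
def pvWitness_get_nearby_date : String × List String × Bool := ("2020-01-02", ["2020-01-01", "2020-01-03"], true)

def Spec_get_nearby_date (date : String) (datelst : List String) (flag_latest : Bool) (out : String) : Prop := out = get_nearby_date_alt date datelst flag_latest
instance (date : String) (datelst : List String) (flag_latest : Bool) (out : String) : Decidable (Spec_get_nearby_date date datelst flag_latest out) := by unfold Spec_get_nearby_date; infer_instance

-- ===== CLAIM (what is proved, stated in full; the proofs are below) =====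
def Claim_equal_get_nearby_date : Prop := ∀ (date : String) (datelst : List String) (flag_latest : Bool), Dom_get_nearby_date date datelst flag_latest → Pre_get_nearby_date date datelst flag_latest → Spec_get_nearby_date date datelst flag_latest (get_nearby_date date datelst flag_latest)

-- ===== LEMMAS AND PROOFS =====

theorem upMax_of_le (date m d : String) (h : d ≤ date) :
    upMax date (some m) d = some (max m d) := by
  unfold upMax
  by_cases hmd : m < d
  · simp [h, hmd, max_eq_right hmd.le]
  · simp [h, hmd, max_eq_left (not_lt.mp hmd)]

theorem upMin_of_le (date m d : String) (h : date ≤ d) :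
    upMin date (some m) d = some (min m d) := by
  unfold upMin
  by_cases hdm : d < m
  · simp [h, hdm, min_eq_right hdm.le]
  · simp [h, hdm, min_eq_left (not_lt.mp hdm)]

theorem foldl_pair_split (date : String) :
    ∀ (l : List String) (p : Option String × Option String),
      l.foldl (fun p d => (upMax date p.1 d, upMin date p.2 d)) p
        = (l.foldl (fun a d => upMax date a d) p.1, l.foldl (fun a d => upMin date a d) p.2) := by
  intro l
  induction l with
  | nil => intro p; rfl
  | cons d l ih => intro p; simp only [List.foldl]; exact ih _

theorem max?_cons_cons (m d : String) (r : List String) :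
    (m :: d :: r).max? = (max m d :: r).max? := by simp [List.max?]

theorem min?_cons_cons (m d : String) (r : List String) :
    (m :: d :: r).min? = (min m d :: r).min? := by simp [List.min?]

theorem foldl_upMax_eq (date : String) :
    ∀ (l : List String) (acc : Option String),
      l.foldl (fun a d => upMax date a d) acc
        = (acc.toList ++ l.filter (fun d => decide (d ≤ date))).max? := by
  intro l
  induction l with
  | nil => intro acc; cases acc <;> simp [List.max?]
  | cons d l ih =>
    intro acc
    rw [List.foldl_cons]
    by_cases hd : d ≤ date
    · rw [List.filter_cons_of_pos (p := fun z => decide (z ≤ date)) (by simpa using hd)]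
      cases acc with
      | none =>
        have h1 : upMax date none d = some d := by unfold upMax; rw [if_pos hd]
        rw [h1, ih (some d)]
        rfl
      | some m =>
        rw [upMax_of_le date m d hd, ih (some (max m d))]
        exact (max?_cons_cons m d _).symm
    · rw [List.filter_cons_of_neg (p := fun z => decide (z ≤ date)) (by simpa using hd)]
      have h1 : upMax date acc d = acc := by unfold upMax; rw [if_neg hd]
      rw [h1, ih acc]

theorem foldl_upMin_eq (date : String) :
    ∀ (l : List String) (acc : Option String),
      l.foldl (fun a d => upMin date a d) acc
        = (acc.toList ++ l.filter (fun d => decide (date ≤ d))).min? := by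
  intro l
  induction l with
  | nil => intro acc; cases acc <;> simp [List.min?]
  | cons d l ih =>
    intro acc
    rw [List.foldl_cons]
    by_cases hd : date ≤ d
    · rw [List.filter_cons_of_pos (p := fun z => decide (date ≤ z)) (by simpa using hd)]
      cases acc with
      | none =>
        have h1 : upMin date none d = some d := by unfold upMin; rw [if_pos hd]
        rw [h1, ih (some d)]
        rfl
      | some m =>
        rw [upMin_of_le date m d hd, ih (some (min m d))]
        exact (min?_cons_cons m d _).symm
    · rw [List.filter_cons_of_neg (p := fun z => decide (date ≤ z)) (by simpa using hd)]
      have h1 : upMin date acc d = acc := by unfold upMin; rw [if_neg hd]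
      rw [h1, ih acc]

theorem max?_congr_mem (l₁ l₂ : List String) (h : ∀ x, x ∈ l₁ ↔ x ∈ l₂) :
    l₁.max? = l₂.max? := by
  cases h1 : l₁.max? with
  | none =>
    rw [List.max?_eq_none_iff] at h1
    subst h1
    symm
    rw [List.max?_eq_none_iff, List.eq_nil_iff_forall_not_mem]
    intro x hx
    exact (List.not_mem_nil) ((h x).mpr hx)
  | some m =>
    rw [List.max?_eq_some_iff] at h1
    symm
    rw [List.max?_eq_some_iff]
    exact ⟨(h m).mp h1.1, fun b hb => h1.2 b ((h b).mpr hb)⟩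

theorem min?_congr_mem (l₁ l₂ : List String) (h : ∀ x, x ∈ l₁ ↔ x ∈ l₂) :
    l₁.min? = l₂.min? := by
  cases h1 : l₁.min? with
  | none =>
    rw [List.min?_eq_none_iff] at h1
    subst h1
    symm
    rw [List.min?_eq_none_iff, List.eq_nil_iff_forall_not_mem]
    intro x hx
    exact (List.not_mem_nil) ((h x).mpr hx)
  | some m =>
    rw [List.min?_eq_some_iff] at h1
    symm
    rw [List.min?_eq_some_iff]
    exact ⟨(h m).mp h1.1, fun b hb => h1.2 b ((h b).mpr hb)⟩

theorem getLast?_max (l : List String) (hp : l.Pairwise (· < ·)) (b : String)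
    (hb : l.getLast? = some b) : b ∈ l ∧ ∀ x ∈ l, x ≤ b := by
  induction l with
  | nil => simp at hb
  | cons a t ih =>
    cases t with
    | nil =>
      simp at hb
      subst hb
      exact ⟨List.mem_singleton_self a, by intro x hx; simp at hx; simp [hx]⟩
    | cons c t' =>
      have hb' : (c :: t').getLast? = some b := by simpa using hb
      have hp' := (List.pairwise_cons.mp hp).2
      have ha := (List.pairwise_cons.mp hp).1
      obtain ⟨hmem, hbound⟩ := ih hp' hb'
      refine ⟨List.mem_cons_of_mem a hmem, ?_⟩
      intro x hx
      rcases List.mem_cons.mp hx with hxa | hxt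
      · subst hxa; exact (ha b hmem).le
      · exact hbound x hxt

theorem pyGet?_zero (a : String) (t : List String) :
    PySem.List.pyGet? (a :: t) 0 = some a := by
  simp [PySem.List.pyGet?, PySem.List.pyIdx?]

theorem pyGet?_neg_one (s : List String) (h : s ≠ []) :
    PySem.List.pyGet? s (-1) = s.getLast? := by
  simp [PySem.List.pyGet?, PySem.List.pyIdx?]
  have hl : 1 ≤ s.length := List.length_pos_iff.mpr h
  rw [if_pos hl]
  simp [List.getLast?_eq_getElem?]

theorem scan_correct (date : String) (flag : Bool) :
    ∀ (t : List String) (a : String),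
      (a :: t).Pairwise (· < ·) → date ∉ a :: t → a < date → (∃ y ∈ t, date < y) →
      ∃ lo hi, ((a :: t).filter (fun d => decide (d ≤ date))).max? = some lo ∧
               ((a :: t).filter (fun d => decide (date ≤ d))).min? = some hi ∧
               scanA date flag (a :: t) = some (if flag then lo else hi) := by
  intro t
  induction t with
  | nil => intro a _ _ _ hex; simp at hex
  | cons b t' ih =>
    intro a hp hnot had hex
    have hab : a < b := (List.pairwise_cons.mp hp).1 b (List.mem_cons_self)
    have hpt : (b :: t').Pairwise (· < ·) := (List.pairwise_cons.mp hp).2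
    have hbt : ∀ x ∈ t', b < x := (List.pairwise_cons.mp hpt).1
    have hdb' : date ≠ b := by intro h; exact hnot (by simp [h])
    have hnott : date ∉ b :: t' := by intro h; exact hnot (List.mem_cons_of_mem a h)
    by_cases hdb : date < b
    · refine ⟨a, b, ?_, ?_, ?_⟩
      · -- elements after a are all > date, so the ≤-filter is [a]
        have hnil : (b :: t').filter (fun d => decide (d ≤ date)) = [] := by
          rw [List.filter_eq_nil_iff]
          intro x hx
          rcases List.mem_cons.mp hx with hxb | hxt
          · subst hxb; simp only [decide_eq_true_eq]; exact not_le.mpr hdb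
          · simp only [decide_eq_true_eq]; exact not_le.mpr (hdb.trans (hbt x hxt))
        rw [List.filter_cons_of_pos (p := fun z => decide (z ≤ date)) (by simpa using had.le), hnil]
        rfl
      · -- the ≥-filter is b :: t', whose min is b
        have hft : t'.filter (fun d => decide (date ≤ d)) = t' := by
          rw [List.filter_eq_self]
          intro x hx
          exact decide_eq_true (hdb.trans (hbt x hx)).le
        rw [List.filter_cons_of_neg (p := fun z => decide (date ≤ z)) (by simpa using not_le.mpr had),
          List.filter_cons_of_pos (p := fun z => decide (date ≤ z)) (by simpa using hdb.le), hft, List.min?_eq_some_iff]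
        refine ⟨List.mem_cons_self, ?_⟩
        intro x hx
        rcases List.mem_cons.mp hx with hxb | hxt
        · subst hxb; exact le_rfl
        · exact (hbt x hxt).le
      · simp only [scanA]
        rw [if_pos ⟨had, hdb⟩]
    · have hbd : b < date := lt_of_le_of_ne (not_lt.mp hdb) (fun h => hdb' h.symm)
      obtain ⟨y, hy, hdy⟩ := hex
      have hyt : y ∈ t' := by
        rcases List.mem_cons.mp hy with hyb | hyt
        · subst hyb; exact absurd hdy (not_lt.mpr hbd.le)
        · exact hyt
      obtain ⟨lo, hi, hmax, hmin, hscan⟩ := ih b hpt hnott hbd ⟨y, hyt, hdy⟩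
      have hlomem : lo ∈ b :: t' := by
        have := (List.max?_eq_some_iff.mp hmax).1
        exact (List.mem_filter.mp this).1
      have halo : a ≤ lo := by
        rcases List.mem_cons.mp hlomem with h | h
        · subst h; exact hab.le
        · exact (hab.trans (hbt lo h)).le
      refine ⟨lo, hi, ?_, ?_, ?_⟩
      · rw [List.max?_eq_some_iff]
        obtain ⟨hm1, hm2⟩ := List.max?_eq_some_iff.mp hmax
        constructor
        · rw [List.filter_cons_of_pos (p := fun z => decide (z ≤ date)) (by simpa using had.le)]
          exact List.mem_cons_of_mem a hm1
        · intro x hx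
          rw [List.filter_cons_of_pos (p := fun z => decide (z ≤ date)) (by simpa using had.le)] at hx
          rcases List.mem_cons.mp hx with hxa | hxf
          · subst hxa; exact halo
          · exact hm2 x hxf
      · rw [List.filter_cons_of_neg (p := fun z => decide (date ≤ z)) (by simpa using not_le.mpr had)]
        exact hmin
      · rw [show scanA date flag (a :: b :: t') = scanA date flag (b :: t') by
          simp only [scanA]; rw [if_neg (fun h => hdb h.2)]]
        exact hscan

-- ===== VERDICT (by name: the statement is the Claim_ definition above) =====
theorem get_nearby_date_spec : Claim_equal_get_nearby_date := by
  intro date datelst flag _hdom hpre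
  unfold Spec_get_nearby_date
  simp only [get_nearby_date, get_nearby_date_alt]
  rw [foldl_pair_split date datelst (none, none)]
  rw [foldl_upMax_eq date datelst none, foldl_upMin_eq date datelst none]
  set s := PySem.List.sorted (PySem.Set.ofList datelst) (fun x => x) false with hs
  have hmem : ∀ x, x ∈ s ↔ x ∈ datelst := fun x =>
    (PySem.List.mem_sorted _ _ _ x).trans (PySem.Set.mem_ofList datelst x)
  have hpair : s.Pairwise (· < ·) := PySem.List.sorted_ofList_pairwise_lt datelst
  have hsne : s ≠ [] := by
    rw [hs, Ne, PySem.List.sorted_eq_nil_iff, List.eq_nil_iff_forall_not_mem]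
    intro hnone
    obtain ⟨x, hx⟩ := List.exists_mem_of_ne_nil datelst hpre
    exact hnone x ((PySem.Set.mem_ofList datelst x).mpr hx)
  have hmaxb : (datelst.filter (fun d => decide (d ≤ date))).max?
      = (s.filter (fun d => decide (d ≤ date))).max? := by
    apply max?_congr_mem
    intro x
    simp only [List.mem_filter, hmem x]
  have hminb : (datelst.filter (fun d => decide (date ≤ d))).min?
      = (s.filter (fun d => decide (date ≤ d))).min? := by
    apply min?_congr_mem
    intro x
    simp only [List.mem_filter, hmem x]
  simp only [Option.toList, List.nil_append, hmaxb, hminb]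
  by_cases h1 : date ∈ s
  · rw [if_pos h1]
    have hlo : (s.filter (fun d => decide (d ≤ date))).max? = some date := by
      rw [List.max?_eq_some_iff]
      refine ⟨List.mem_filter.mpr ⟨h1, decide_eq_true le_rfl⟩, ?_⟩
      intro b hb
      exact of_decide_eq_true (List.mem_filter.mp hb).2
    rw [hlo, if_pos rfl]
  · rw [if_neg h1]
    obtain ⟨first, t, hst⟩ := List.exists_cons_of_ne_nil hsne
    rw [hst] at hmem hpair h1 ⊢
    rw [pyGet?_zero]
    dsimp only
    have hfirst_all : ∀ x ∈ t, first < x := (List.pairwise_cons.mp hpair).1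
    by_cases h2 : date < first
    · rw [if_pos h2]
      have hlo : ((first :: t).filter (fun d => decide (d ≤ date))).max? = none := by
        rw [List.max?_eq_none_iff, List.filter_eq_nil_iff]
        intro x hx
        simp only [decide_eq_true_eq]
        rcases List.mem_cons.mp hx with hxa | hxt
        · subst hxa; exact not_le.mpr h2
        · exact not_le.mpr (h2.trans (hfirst_all x hxt))
      have hhi : ((first :: t).filter (fun d => decide (date ≤ d))).min? = some first := by
        have hft : t.filter (fun d => decide (date ≤ d)) = t := by
          rw [List.filter_eq_self]
          intro x hx
          exact decide_eq_true (h2.trans (hfirst_all x hx)).le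
        rw [List.filter_cons_of_pos (p := fun z => decide (date ≤ z)) (by simpa using h2.le),
          hft, List.min?_eq_some_iff]
        refine ⟨List.mem_cons_self, ?_⟩
        intro x hx
        rcases List.mem_cons.mp hx with hxa | hxt
        · subst hxa; exact le_rfl
        · exact (hfirst_all x hxt).le
      rw [hlo, hhi, if_neg (by simp)]
    · rw [if_neg h2]
      have hfd : first < date := by
        refine lt_of_le_of_ne (not_lt.mp h2) (fun h => h1 ?_)
        rw [h]; exact List.mem_cons_self
      rw [pyGet?_neg_one (first :: t) (List.cons_ne_nil first t)]
      obtain ⟨last, hlast⟩ := Option.isSome_iff_exists.mp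
        (List.getLast?_isSome.mpr (List.cons_ne_nil first t))
      rw [hlast]
      dsimp only
      obtain ⟨hlmem, hlbound⟩ := getLast?_max (first :: t) hpair last hlast
      by_cases h3 : last < date
      · rw [if_pos h3]
        have hlo : ((first :: t).filter (fun d => decide (d ≤ date))).max? = some last := by
          have hfl : (first :: t).filter (fun d => decide (d ≤ date)) = first :: t := by
            rw [List.filter_eq_self]
            intro x hx
            exact decide_eq_true ((hlbound x hx).trans h3.le)
          rw [hfl, List.max?_eq_some_iff]
          exact ⟨hlmem, hlbound⟩
        have hhi : ((first :: t).filter (fun d => decide (date ≤ d))).min? = none := by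
          rw [List.min?_eq_none_iff, List.filter_eq_nil_iff]
          intro x hx
          simp only [decide_eq_true_eq]
          exact not_le.mpr (lt_of_le_of_lt (hlbound x hx) h3)
        have hld : last ≠ date := ne_of_lt h3
        rw [hlo, hhi, if_neg (by simpa using hld)]
      · rw [if_neg h3]
        have hdl : date < last := by
          refine lt_of_le_of_ne (not_lt.mp h3) (fun h => h1 ?_)
          rw [h]; exact hlmem
        have hlt : last ∈ t := by
          rcases List.mem_cons.mp hlmem with h | h
          · subst h; exact absurd hdl (not_lt.mpr hfd.le)
          · exact h
        obtain ⟨lo, hi, hmax, hmin, hscan⟩ :=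
          scan_correct date flag t first hpair h1 hfd ⟨last, hlt, hdl⟩
        have hlod : lo ≠ date := by
          intro h
          apply h1
          have := (List.max?_eq_some_iff.mp hmax).1
          exact h ▸ (List.mem_filter.mp this).1
        rw [hmax, hmin, hscan, if_neg (show ¬ some lo = some date by simpa using hlod)]
        rfl
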